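-- pv_equiv track=rewrite | github.com/migostro/sistemas-de-biologia | vpl3/ListaVPL_03.py | estados
-- ===== SOURCE A (Python) =====
-- import copy
--
-- def adicionaEstado(listaEstados, val):
--     n = len(listaEstados)
--     for j in range(n) :
--         # adiciona val no final da lista
--         listaEstados[j] += val
--
-- def esta(gene, func):
--     for i in range(len(func)):
--         if gene in func[i]:
--             return i
--     return -1
--
-- def estado(gene):
--     if '!' in gene:
--         return '0'
--     else:
--         return '1'
--
-- def estados(listaGenes, func):
--     listaEstados = ['']
--
--     for i in range(len(listaGenes)):
--
--         index = esta(listaGenes[i], func)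
--         #caso o gene tenha uma função definida
--         # adiciona a tabela apenas o estado possivel
--         if index != -1:
--             adicionaEstado(listaEstados, estado(func[index]))
--         # caso o gene não tenha função definida
--         # adiciona os dois estados (duplica a tabela)
--         else:
--             lista0 = copy.deepcopy(listaEstados)
--             lista1 = copy.deepcopy(listaEstados)
--
--             adicionaEstado(lista0, '0')
--             adicionaEstado(lista1, '1')
--
--             # duplica a lista
--             listaEstados = lista0 + lista1
--
--     return listaEstados
-- ===== SOURCE B (Python) =====
-- def estados(listaGenes, func):
--     # one pass: per-gene slot ('0'/'1' if its function fixes it, None if free), counting free genes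
--     slots = []
--     k = 0
--     for g in listaGenes:
--         f = next((fx for fx in func if g in fx), None)
--         if f is None:
--             slots.append(None)
--             k += 1
--         else:
--             slots.append('0' if '!' in f else '1')
--     # binary-counter enumeration: build each row string once via join
--     out = []
--     for m in range(1 << k):
--         parts = []
--         r = m
--         for s in slots:
--             if s is None:
--                 parts.append('1' if r & 1 else '0')
--                 r >>= 1
--             else:
--                 parts.append(s)
--         out.append(''.join(parts))
--     return out
-- ===== Notes on version B (the rewrite author's own statement) =====
-- stated objective: faster
-- what changed: B precomputes each gene's fixed/free slot in one pass over the genes, then enumerates the 2^k free-bit combinations with a binary counter and builds every output string once via join, instead of A's repeated table-wide string appends and deepcopy-duplication of the whole growing table.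
import Mathlib
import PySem

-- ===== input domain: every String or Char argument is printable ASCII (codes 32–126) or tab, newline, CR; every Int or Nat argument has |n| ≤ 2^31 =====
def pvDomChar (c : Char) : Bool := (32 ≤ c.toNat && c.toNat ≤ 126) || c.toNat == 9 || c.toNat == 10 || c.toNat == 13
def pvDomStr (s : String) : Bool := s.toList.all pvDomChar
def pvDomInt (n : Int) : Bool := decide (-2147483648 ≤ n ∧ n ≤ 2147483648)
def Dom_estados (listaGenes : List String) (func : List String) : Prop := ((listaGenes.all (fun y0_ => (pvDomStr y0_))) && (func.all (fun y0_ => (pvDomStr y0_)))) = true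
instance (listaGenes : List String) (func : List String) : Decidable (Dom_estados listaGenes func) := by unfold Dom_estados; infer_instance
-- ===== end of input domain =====

-- B replaces A's table-wide string appends and deepcopy duplication by a one-pass slot
-- precomputation plus a binary-counter enumeration that builds each row string once (faster).
-- A only mutates lists it creates locally; neither version mutates its arguments.

-- ===== PORT A =====
-- listaEstados[j] += val for every j (in-place in Python; ported as the resulting list)
def adicionaEstado (listaEstados : List String) (val : String) : List String :=
  listaEstados.map (fun s => s ++ val)

def estaAux (gene : String) (func : List String) (i : Int) : Int :=
  match func with
  | [] => -1
  | f :: rest => if PySem.Str.isIn gene f then i else estaAux gene rest (i + 1)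

def esta (gene : String) (func : List String) : Int := estaAux gene func 0

def estado (gene : String) : String :=
  if PySem.Str.isIn "!" gene then "0" else "1"

def estados (listaGenes : List String) (func : List String) : List String :=
  listaGenes.foldl (fun listaEstados g =>
    let index := esta g func
    if index ≠ -1 then
      -- func[index] is always in range here, so pyGetD is exact
      adicionaEstado listaEstados (estado (PySem.List.pyGetD func index ""))
    else
      -- deepcopy on a list of strings is the identity on the value
      let lista0 := adicionaEstado listaEstados "0"
      let lista1 := adicionaEstado listaEstados "1"
      lista0 ++ lista1) [""]

-- ===== PORT B =====
-- next((fx for fx in func if g in fx), None)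
def firstContaining (g : String) (func : List String) : Option String :=
  match func with
  | [] => none
  | f :: rest => if PySem.Str.isIn g f then some f else firstContaining g rest

-- the first loop of Source B: slots plus the free-gene count k
def buildSlots (listaGenes : List String) (func : List String) : List (Option String) × Nat :=
  listaGenes.foldl (fun st g =>
    match firstContaining g func with
    | none => (st.1 ++ [none], st.2 + 1)
    | some f => (st.1 ++ [some (if PySem.Str.isIn "!" f then "0" else "1")], st.2)) ([], 0)

-- the inner loop over slots: consume one bit of the counter per free slot
-- (r is a nonnegative Python int; Nat % 2 / Nat / 2 are exact for r & 1, r >> 1 there)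
def buildRow (slots : List (Option String)) (r : Nat) : List String :=
  match slots with
  | [] => []
  | none :: rest => (if r % 2 = 1 then "1" else "0") :: buildRow rest (r / 2)
  | some s :: rest => s :: buildRow rest r

def estados_alt (listaGenes : List String) (func : List String) : List String :=
  let sl := buildSlots listaGenes func
  -- range(1 << k) over nonnegative ints
  (List.range (2 ^ sl.2)).map (fun m => PySem.Str.join "" (buildRow sl.1 m))

-- ===== PRECONDITION & SPEC =====
def Spec_estados (listaGenes : List String) (func : List String) (out : List String) : Prop := out = estados_alt listaGenes func
instance (listaGenes : List String) (func : List String) (out : List String) : Decidable (Spec_estados listaGenes func out) := by unfold Spec_estados; infer_instance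

-- ===== CLAIM (what is proved, stated in full; the proofs are below) =====
def Claim_equal_estados : Prop := ∀ (listaGenes : List String) (func : List String), Dom_estados listaGenes func → Spec_estados listaGenes func (estados listaGenes func)

-- ===== LEMMAS AND PROOFS =====

-- the common table: recursion over the per-gene slots
def tab : List (Option String) → List String
  | [] => [""]
  | some c :: rest => (tab rest).map (fun t => c ++ t)
  | none :: rest => (tab rest).flatMap (fun t => ["0" ++ t, "1" ++ t])

-- per-gene slot as B's first loop computes it
def slotOf (func : List String) (g : String) : Option String :=
  (firstContaining g func).map (fun f => if PySem.Str.isIn "!" f then "0" else "1")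

def countFree (slots : List (Option String)) : Nat :=
  slots.countP (fun s => s.isNone)

lemma esta_firstContaining (g : String) (func : List String) :
    (∀ i : Nat, firstContaining g func = none → estaAux g func i = -1) ∧
    (∀ f, firstContaining g func = some f → ∀ i : Nat,
      ∃ j : Nat, estaAux g func i = ((i + j : Nat) : Int) ∧ func[j]? = some f) := by
  induction func with
  | nil =>
    exact ⟨fun i _ => rfl, fun f h i => by simp [firstContaining] at h⟩
  | cons f0 rest ih =>
    cases hin : PySem.Chars.isIn g.toList f0.toList with
    | true =>
      constructor
      · intro i h; simp [firstContaining, hin] at h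
      · intro f h i
        simp only [firstContaining, PySem.Str.isIn_eq, hin, if_true] at h
        refine ⟨0, by simp [estaAux, hin], ?_⟩
        simpa using h
    | false =>
      constructor
      · intro i h
        simp only [firstContaining, PySem.Str.isIn_eq, hin] at h
        simp only [Bool.false_eq_true, if_false] at h
        have := ih.1 (i + 1) h
        simp only [estaAux, PySem.Str.isIn_eq, hin, Bool.false_eq_true, if_false]
        have hc : ((i : Int) + 1) = ((i + 1 : Nat) : Int) := by push_cast; ring
        rw [hc, this]
      · intro f h i
        simp only [firstContaining, PySem.Str.isIn_eq, hin, Bool.false_eq_true, if_false] at h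
        obtain ⟨j, hj1, hj2⟩ := ih.2 f h (i + 1)
        refine ⟨j + 1, ?_, by simpa using hj2⟩
        simp only [estaAux, PySem.Str.isIn_eq, hin, Bool.false_eq_true, if_false]
        have hc : ((i : Int) + 1) = ((i + 1 : Nat) : Int) := by push_cast; ring
        rw [hc, hj1]
        push_cast; ring

lemma buildSlots_go (func : List String) (gs : List String) :
    ∀ acc : List (Option String) × Nat,
      gs.foldl (fun st g =>
        match firstContaining g func with
        | none => (st.1 ++ [none], st.2 + 1)
        | some f => (st.1 ++ [some (if PySem.Str.isIn "!" f then "0" else "1")], st.2)) acc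
      = (acc.1 ++ gs.map (slotOf func), acc.2 + countFree (gs.map (slotOf func))) := by
  induction gs with
  | nil => intro acc; simp [countFree]
  | cons g rest ih =>
    intro acc
    simp only [List.foldl_cons, List.map_cons]
    cases hfc : firstContaining g func with
    | none =>
      rw [ih]
      simp [slotOf, hfc, countFree]
      omega
    | some f =>
      rw [ih]
      simp [slotOf, hfc, countFree]

lemma buildSlots_eq (listaGenes func : List String) :
    buildSlots listaGenes func =
      (listaGenes.map (slotOf func), countFree (listaGenes.map (slotOf func))) := by
  unfold buildSlots
  simpa using buildSlots_go func listaGenes ([], 0)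

lemma join_empty_cons (s : String) (l : List String) :
    PySem.Str.join "" (s :: l) = s ++ PySem.Str.join "" l := by
  apply String.toList_inj.mp
  cases l with
  | nil => simp [PySem.Str.toList_join, PySem.Chars.join_singleton, PySem.Chars.join_nil]
  | cons t r => simp [PySem.Str.toList_join, PySem.Chars.join_cons_cons]

lemma pvRangeTwoMul (n : Nat) :
    List.range (2 * n) = (List.range n).flatMap (fun i => [2 * i, 2 * i + 1]) := by
  induction n with
  | zero => rfl
  | succ n ih =>
    rw [show 2 * (n + 1) = 2 * n + 1 + 1 from by ring, List.range_succ, List.range_succ, ih,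
      List.range_succ, List.flatMap_append]
    simp

lemma alt_eq_tab (slots : List (Option String)) :
    (List.range (2 ^ countFree slots)).map (fun m => PySem.Str.join "" (buildRow slots m)) = tab slots := by
  induction slots with
  | nil => simp [countFree, tab, buildRow, PySem.Str.join]
  | cons s rest ih =>
    cases s with
    | some c =>
      have hk : countFree (some c :: rest) = countFree rest := by
        simp [countFree]
      rw [hk]
      calc (List.range (2 ^ countFree rest)).map
              (fun m => PySem.Str.join "" (buildRow (some c :: rest) m))
          = (List.range (2 ^ countFree rest)).map
              (fun m => c ++ PySem.Str.join "" (buildRow rest m)) := by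
            simp only [buildRow, join_empty_cons]
        _ = ((List.range (2 ^ countFree rest)).map
              (fun m => PySem.Str.join "" (buildRow rest m))).map (fun t => c ++ t) := by
            rw [List.map_map]; rfl
        _ = tab (some c :: rest) := by rw [ih]; rfl
    | none =>
      have hk : countFree (none :: rest) = countFree rest + 1 := by
        simp [countFree]
      rw [hk, pow_succ, Nat.mul_comm, pvRangeTwoMul]
      rw [List.map_flatMap]
      show (List.range (2 ^ countFree rest)).flatMap
          (fun i => [PySem.Str.join "" (buildRow (none :: rest) (2 * i)),
                     PySem.Str.join "" (buildRow (none :: rest) (2 * i + 1))]) = _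
      have h0 : ∀ i : Nat, buildRow (none :: rest) (2 * i) = "0" :: buildRow rest i := by
        intro i; simp [buildRow, Nat.mul_mod_right]
      have h1 : ∀ i : Nat, buildRow (none :: rest) (2 * i + 1) = "1" :: buildRow rest i := by
        intro i
        have hm : (2 * i + 1) % 2 = 1 := by omega
        have hd : (2 * i + 1) / 2 = i := by omega
        simp [buildRow, hm, hd]
      rw [show tab (none :: rest) = (tab rest).flatMap (fun t => ["0" ++ t, "1" ++ t]) from rfl,
        ← ih, List.flatMap_map]
      simp only [h0, h1, join_empty_cons]

lemma estados_go (func : List String) (gs : List String) :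
    ∀ acc : List String,
      gs.foldl (fun listaEstados g =>
        let index := esta g func
        if index ≠ -1 then
          adicionaEstado listaEstados (estado (PySem.List.pyGetD func index ""))
        else
          let lista0 := adicionaEstado listaEstados "0"
          let lista1 := adicionaEstado listaEstados "1"
          lista0 ++ lista1) acc
      = (tab (gs.map (slotOf func))).flatMap (fun t => acc.map (· ++ t)) := by
  induction gs with
  | nil =>
    intro acc
    simp [tab]
  | cons g rest ih =>
    intro acc
    simp only [List.foldl_cons, List.map_cons]
    rw [ih]
    cases hfc : firstContaining g func with
    | none =>
      have hesta : esta g func = -1 := (esta_firstContaining g func).1 0 hfc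
      have hslot : slotOf func g = none := by simp [slotOf, hfc]
      rw [hslot]
      simp only [hesta, ne_eq, not_true_eq_false, if_false, adicionaEstado, tab,
        List.flatMap_assoc]
      congr 1
      funext t
      simp [List.map_append, List.map_map, Function.comp_def, String.append_assoc]
    | some f =>
      obtain ⟨j, hj1, hj2⟩ := (esta_firstContaining g func).2 f hfc 0
      have hesta : esta g func = (j : Int) := by simpa using hj1
      have hne : esta g func ≠ -1 := by rw [hesta]; omega
      have hget : PySem.List.pyGetD func (esta g func) "" = f := by
        rw [hesta, PySem.List.pyGetD_natCast]
        rw [List.getD_eq_getElem?_getD, hj2]; rfl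
      have hslot : slotOf func g = some (if PySem.Str.isIn "!" f then "0" else "1") := by
        simp [slotOf, hfc]
      rw [hslot]
      simp only [hne, ne_eq, not_false_eq_true, if_true, hget, adicionaEstado, estado, tab,
        List.flatMap_map]
      congr 1
      funext t
      simp [List.map_map, Function.comp_def, String.append_assoc]

lemma estados_eq_tab (listaGenes func : List String) :
    estados listaGenes func = tab (listaGenes.map (slotOf func)) := by
  unfold estados
  rw [estados_go]
  simp

-- ===== VERDICT (by name: the statement is the Claim_ definition above) =====
theorem estados_spec : Claim_equal_estados := by
  intro lg f _
  unfold Spec_estados estados_alt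
  rw [buildSlots_eq, estados_eq_tab, alt_eq_tab]
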